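-- pv_equiv track=rewrite | github.com/Jakshas/University | SI/Pracownia1/zadanie1.py | ruchywierzy
-- ===== SOURCE A (Python) =====
-- def ruchywierzy(bk, bw , ck):
--     x = bw[0]
--     y = bw[1]
--     j = 1
--     wynik = []
--     while ord(x) + j <= 104 and (ord(x) + j != ord(bk[0]) or ord(y) != ord(bk[1])):
--         wynik.append(chr(ord(x) + j) + y)
--         j = j + 1
--     j = 1
--     while ord(x) - j >= 97 and (ord(x) - j != ord(bk[0]) or ord(y) != ord(bk[1])):
--         wynik.append(chr(ord(x) - j) + y)
--         j = j + 1
--     j = 1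
--     while ord(y) + j <= 56 and (ord(x) != ord(bk[0]) or ord(y) + j != ord(bk[1])):
--         wynik.append(x + chr(ord(y) + j))
--         j = j + 1
--     j = 1
--     while ord(y) - j >= 49 and (ord(x) != ord(bk[0]) or ord(y) - j != ord(bk[1])):
--         wynik.append(x + chr(ord(y) - j))
--         j = j + 1
--     return wynik
-- ===== SOURCE B (Python) =====
-- def ruchywierzy(bk, bw, ck):
--     x, y = bw[0], bw[1]
--     xi, yi = ord(x), ord(y)
--     k0, k1 = ord(bk[0]), ord(bk[1])
--     # precompute the reachable endpoint in each direction: board edge, or one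
--     # square before the king when the king sits on the same line in that direction
--     e_right = min(104, k0 - 1) if (yi == k1 and k0 > xi) else 104
--     e_left = max(97, k0 + 1) if (yi == k1 and k0 < xi) else 97
--     e_up = min(56, k1 - 1) if (xi == k0 and k1 > yi) else 56
--     e_down = max(49, k1 + 1) if (xi == k0 and k1 < yi) else 49
--     return ([chr(c) + y for c in range(xi + 1, e_right + 1)]
--             + [chr(c) + y for c in range(xi - 1, e_left - 1, -1)]
--             + [x + chr(c) for c in range(yi + 1, e_up + 1)]
--             + [x + chr(c) for c in range(yi - 1, e_down - 1, -1)])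
-- ===== Notes on version B (the rewrite author's own statement) =====
-- stated objective: simpler
-- what changed: Replaces A's four per-step while loops (which re-test the board edge and the king at every square) by a precomputed reachable endpoint per direction (edge, or one square before a king on that line) and four range comprehensions concatenated in the same order.
-- outside the precondition, e.g. on ruchywierzy('', 'e4', ''): A raises IndexError, B raises IndexError
import Mathlib
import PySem

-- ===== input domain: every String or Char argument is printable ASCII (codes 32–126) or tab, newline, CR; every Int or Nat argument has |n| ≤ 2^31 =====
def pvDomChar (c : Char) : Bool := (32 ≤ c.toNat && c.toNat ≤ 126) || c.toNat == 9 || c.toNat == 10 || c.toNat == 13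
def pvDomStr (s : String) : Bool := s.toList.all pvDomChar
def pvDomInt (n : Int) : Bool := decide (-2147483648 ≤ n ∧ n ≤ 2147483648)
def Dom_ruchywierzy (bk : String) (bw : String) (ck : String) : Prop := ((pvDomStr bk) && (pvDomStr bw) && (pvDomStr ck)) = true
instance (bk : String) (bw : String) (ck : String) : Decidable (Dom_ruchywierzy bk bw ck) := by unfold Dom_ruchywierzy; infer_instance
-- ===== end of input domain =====

-- B replaces A's four per-step while loops (compound stop test re-evaluated at every square)
-- by a precomputed endpoint per direction and a range comprehension: simpler decomposition, same values.

-- ===== PORT A =====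
def pvOrd (c : Char) : Int := (c.toNat : Int)
def pvChr (n : Int) : Char := Char.ofNat n.toNat

-- one while loop of A, moving up (c := c+1); fuel is the loop's trivial bound
def pvLoopUp (bound kb ko other : Int) (mk : Int → String) : Nat → Int → List String
  | 0, _ => []
  | fuel+1, c =>
    if c ≤ bound ∧ (c ≠ kb ∨ other ≠ ko) then mk c :: pvLoopUp bound kb ko other mk fuel (c+1)
    else []

-- one while loop of A, moving down (c := c-1)
def pvLoopDown (bound kb ko other : Int) (mk : Int → String) : Nat → Int → List String
  | 0, _ => []
  | fuel+1, c =>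
    if bound ≤ c ∧ (c ≠ kb ∨ other ≠ ko) then mk c :: pvLoopDown bound kb ko other mk fuel (c-1)
    else []

def ruchywierzy (bk : String) (bw : String) (ck : String) : List String :=
  match PySem.Str.pyGet? bw 0, PySem.Str.pyGet? bw 1, PySem.Str.pyGet? bk 0, PySem.Str.pyGet? bk 1 with
  | some x, some y, some b0, some b1 =>
      pvLoopUp 104 (pvOrd b0) (pvOrd b1) (pvOrd y) (fun c => String.mk [pvChr c, y]) (105 - pvOrd x).toNat (pvOrd x + 1)
      ++ pvLoopDown 97 (pvOrd b0) (pvOrd b1) (pvOrd y) (fun c => String.mk [pvChr c, y]) (pvOrd x - 96).toNat (pvOrd x - 1)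
      ++ pvLoopUp 56 (pvOrd b1) (pvOrd b0) (pvOrd x) (fun c => String.mk [x, pvChr c]) (57 - pvOrd y).toNat (pvOrd y + 1)
      ++ pvLoopDown 49 (pvOrd b1) (pvOrd b0) (pvOrd x) (fun c => String.mk [x, pvChr c]) (pvOrd y - 48).toNat (pvOrd y - 1)
  | _, _, _, _ => []

-- ===== PORT B =====
def pvOrdB (c : Char) : Int := (c.toNat : Int)
def pvChrB (n : Int) : Char := Char.ofNat n.toNat

def ruchywierzy_alt (bk : String) (bw : String) (ck : String) : List String :=
  Option.getD
    ((PySem.Str.pyGet? bw 0).bind fun x =>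
     (PySem.Str.pyGet? bw 1).bind fun y =>
     (PySem.Str.pyGet? bk 0).bind fun b0 =>
     (PySem.Str.pyGet? bk 1).map fun b1 =>
       ((PySem.List.pyRange (pvOrdB x + 1) ((if pvOrdB y = pvOrdB b1 ∧ pvOrdB b0 > pvOrdB x then min 104 (pvOrdB b0 - 1) else 104) + 1) 1).map
           (fun c => String.mk [pvChrB c, y]))
       ++ ((PySem.List.pyRange (pvOrdB x - 1) ((if pvOrdB y = pvOrdB b1 ∧ pvOrdB b0 < pvOrdB x then max 97 (pvOrdB b0 + 1) else 97) - 1) (-1)).map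
           (fun c => String.mk [pvChrB c, y]))
       ++ ((PySem.List.pyRange (pvOrdB y + 1) ((if pvOrdB x = pvOrdB b0 ∧ pvOrdB b1 > pvOrdB y then min 56 (pvOrdB b1 - 1) else 56) + 1) 1).map
           (fun c => String.mk [x, pvChrB c]))
       ++ ((PySem.List.pyRange (pvOrdB y - 1) ((if pvOrdB x = pvOrdB b0 ∧ pvOrdB b1 < pvOrdB y then max 49 (pvOrdB b1 + 1) else 49) - 1) (-1)).map
           (fun c => String.mk [x, pvChrB c])))
    []

-- ===== PRECONDITION & SPEC =====
-- Pre_ excludes strings of fewer than 2 characters: there A raises IndexError, except when bk has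
-- exactly 1 character that never matches the rook's line, where A returns by short-circuit accident
-- while B (reading bk[1] up front) raises.
def Pre_ruchywierzy (bk : String) (bw : String) (ck : String) : Prop :=
  2 ≤ PySem.Str.len bw ∧ 2 ≤ PySem.Str.len bk
instance (bk : String) (bw : String) (ck : String) : Decidable (Pre_ruchywierzy bk bw ck) := by
  unfold Pre_ruchywierzy; infer_instance
def pvWitness_ruchywierzy : String × String × String := ("e4", "a1", "")

def Spec_ruchywierzy (bk : String) (bw : String) (ck : String) (out : List String) : Prop := out = ruchywierzy_alt bk bw ck
instance (bk : String) (bw : String) (ck : String) (out : List String) : Decidable (Spec_ruchywierzy bk bw ck out) := by unfold Spec_ruchywierzy; infer_instance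

-- ===== CLAIM (what is proved, stated in full; the proofs are below) =====
def Claim_equal_ruchywierzy : Prop := ∀ (bk : String) (bw : String) (ck : String), Dom_ruchywierzy bk bw ck → Pre_ruchywierzy bk bw ck → Spec_ruchywierzy bk bw ck (ruchywierzy bk bw ck)

-- ===== LEMMAS AND PROOFS =====

lemma pvLoopUp_eq (bound kb ko other : Int) (mk : Int → String) :
    ∀ (fuel : Nat) (c : Int), (bound + 1 - c).toNat ≤ fuel →
      pvLoopUp bound kb ko other mk fuel c
        = (PySem.List.pyRange c ((if other = ko ∧ c ≤ kb then min bound (kb - 1) else bound) + 1) 1).map mk := by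
  intro fuel
  induction fuel with
  | zero =>
      intro c h
      rw [pvLoopUp, PySem.List.pyRange_one_eq_nil (by split_ifs <;> omega), List.map_nil]
  | succ n ih =>
      intro c h
      by_cases h1 : c ≤ bound ∧ (c ≠ kb ∨ other ≠ ko)
      · rw [pvLoopUp, if_pos h1, ih (c + 1) (by omega)]
        by_cases hb : other = ko ∧ c ≤ kb
        · have hkb : c < kb := by
            rcases h1.2 with h2 | h2
            · omega
            · exact absurd hb.1 h2
          rw [if_pos hb, if_pos ⟨hb.1, by omega⟩,
            PySem.List.pyRange_one_cons (a := c) (by omega), List.map_cons]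
        · rw [if_neg hb, if_neg (by intro hx; exact hb ⟨hx.1, by omega⟩),
            PySem.List.pyRange_one_cons (a := c) (by omega), List.map_cons]
      · rw [pvLoopUp, if_neg h1]
        push_neg at h1
        by_cases hle : c ≤ bound
        · have := h1 hle
          rw [PySem.List.pyRange_one_eq_nil (by split_ifs <;> omega), List.map_nil]
        · rw [PySem.List.pyRange_one_eq_nil (by split_ifs <;> omega), List.map_nil]

lemma pvLoopDown_eq (bound kb ko other : Int) (mk : Int → String) :
    ∀ (fuel : Nat) (c : Int), (c + 1 - bound).toNat ≤ fuel →
      pvLoopDown bound kb ko other mk fuel c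
        = (PySem.List.pyRange c ((if other = ko ∧ kb ≤ c then max bound (kb + 1) else bound) - 1) (-1)).map mk := by
  intro fuel
  induction fuel with
  | zero =>
      intro c h
      rw [pvLoopDown, PySem.List.pyRange_neg_one_eq_nil (by split_ifs <;> omega), List.map_nil]
  | succ n ih =>
      intro c h
      by_cases h1 : bound ≤ c ∧ (c ≠ kb ∨ other ≠ ko)
      · rw [pvLoopDown, if_pos h1, ih (c - 1) (by omega)]
        by_cases hb : other = ko ∧ kb ≤ c
        · have hkb : kb < c := by
            rcases h1.2 with h2 | h2
            · omega
            · exact absurd hb.1 h2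
          rw [if_pos hb, if_pos ⟨hb.1, by omega⟩,
            PySem.List.pyRange_neg_one_cons (a := c) (by omega), List.map_cons]
        · rw [if_neg hb, if_neg (by intro hx; exact hb ⟨hx.1, by omega⟩),
            PySem.List.pyRange_neg_one_cons (a := c) (by omega), List.map_cons]
      · rw [pvLoopDown, if_neg h1]
        push_neg at h1
        by_cases hle : bound ≤ c
        · have := h1 hle
          rw [PySem.List.pyRange_neg_one_eq_nil (by split_ifs <;> omega), List.map_nil]
        · rw [PySem.List.pyRange_neg_one_eq_nil (by split_ifs <;> omega), List.map_nil]

-- ===== VERDICT (by name: the statement is the Claim_ definition above) =====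
theorem ruchywierzy_spec : Claim_equal_ruchywierzy := by
  intro bk bw ck _hdom hpre
  obtain ⟨hbw0, hbk0⟩ := hpre
  have hbw : 2 ≤ bw.toList.length := by rw [PySem.Str.len_eq] at hbw0; exact_mod_cast hbw0
  have hbk : 2 ≤ bk.toList.length := by rw [PySem.Str.len_eq] at hbk0; exact_mod_cast hbk0
  obtain ⟨x, y, tw, hw⟩ : ∃ x y tw, bw.toList = x :: y :: tw := by
    rcases hl : bw.toList with _ | ⟨a, _ | ⟨b, t⟩⟩ <;> simp [hl] at hbw ⊢
  obtain ⟨p, q, tk, hk⟩ : ∃ p q tk, bk.toList = p :: q :: tk := by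
    rcases hl : bk.toList with _ | ⟨a, _ | ⟨b, t⟩⟩ <;> simp [hl] at hbk ⊢
  have g1 : PySem.Str.pyGet? bw 0 = some x := by
    have h0 : (0:Int) ≤ (tw.length : Int) + 1 := by omega
    simp [PySem.Str.pyGet?, hw, PySem.List.pyGet?, PySem.List.pyIdx?, h0]
  have g2 : PySem.Str.pyGet? bw 1 = some y := by
    simp [PySem.Str.pyGet?, hw, PySem.List.pyGet?, PySem.List.pyIdx?]
  have g3 : PySem.Str.pyGet? bk 0 = some p := by
    have h0 : (0:Int) ≤ (tk.length : Int) + 1 := by omega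
    simp [PySem.Str.pyGet?, hk, PySem.List.pyGet?, PySem.List.pyIdx?, h0]
  have g4 : PySem.Str.pyGet? bk 1 = some q := by
    simp [PySem.Str.pyGet?, hk, PySem.List.pyGet?, PySem.List.pyIdx?]
  unfold Spec_ruchywierzy ruchywierzy ruchywierzy_alt
  rw [g1, g2, g3, g4]
  dsimp only [Option.bind, Option.map, Option.getD]
  simp only [pvOrd, pvOrdB, pvChr, pvChrB]
  rw [pvLoopUp_eq 104 ((p.toNat:Int)) ((q.toNat:Int)) ((y.toNat:Int)) _ _ _ (by omega),
      pvLoopDown_eq 97 ((p.toNat:Int)) ((q.toNat:Int)) ((y.toNat:Int)) _ _ _ (by omega),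
      pvLoopUp_eq 56 ((q.toNat:Int)) ((p.toNat:Int)) ((x.toNat:Int)) _ _ _ (by omega),
      pvLoopDown_eq 49 ((q.toNat:Int)) ((p.toNat:Int)) ((x.toNat:Int)) _ _ _ (by omega)]
  rw [if_congr (by omega : ((y.toNat:Int) = (q.toNat:Int) ∧ (x.toNat:Int) + 1 ≤ (p.toNat:Int)) ↔ ((y.toNat:Int) = (q.toNat:Int) ∧ (p.toNat:Int) > (x.toNat:Int))) rfl rfl,
      if_congr (by omega : ((y.toNat:Int) = (q.toNat:Int) ∧ (p.toNat:Int) ≤ (x.toNat:Int) - 1) ↔ ((y.toNat:Int) = (q.toNat:Int) ∧ (p.toNat:Int) < (x.toNat:Int))) rfl rfl,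
      if_congr (by omega : ((x.toNat:Int) = (p.toNat:Int) ∧ (y.toNat:Int) + 1 ≤ (q.toNat:Int)) ↔ ((x.toNat:Int) = (p.toNat:Int) ∧ (q.toNat:Int) > (y.toNat:Int))) rfl rfl,
      if_congr (by omega : ((x.toNat:Int) = (p.toNat:Int) ∧ (q.toNat:Int) ≤ (y.toNat:Int) - 1) ↔ ((x.toNat:Int) = (p.toNat:Int) ∧ (q.toNat:Int) < (y.toNat:Int))) rfl rfl]
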